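-- pv_equiv track=rewrite | github.com/libardia/smidgebot-v0 | smidge.py | englishArray
-- ===== SOURCE A (Python) =====
-- def englishArray(list, empty='none'):
--     if len(list) == 0:
--         return empty
--     elif len(list) == 1:
--         return list[0]
--     elif len(list) == 2:
--         return f'{list[0]} and {list[1]}'
--     else:
--         string = ''
--         for i, item in enumerate(list):
--             if i != 0:
--                 string += ', '
--             if i == len(list)-1:
--                 string += 'and '
--             string += item
--         return string
-- ===== SOURCE B (Python) =====
-- def englishArray(list, empty='none'):
--     if len(list) == 0:
--         return empty
--     elif len(list) == 1:
--         return list[0]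
--     elif len(list) == 2:
--         return f'{list[0]} and {list[1]}'
--     else:
--         return ', '.join(list[:-1]) + ', and ' + list[-1]
-- ===== Notes on version B (the rewrite author's own statement) =====
-- stated objective: idiomatic
-- what changed: The enumerate loop with per-index comma/'and' branches is replaced by a single ', '.join(list[:-1]) plus a fixed ', and ' + list[-1] tail; the three guard branches stay.
import Mathlib
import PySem

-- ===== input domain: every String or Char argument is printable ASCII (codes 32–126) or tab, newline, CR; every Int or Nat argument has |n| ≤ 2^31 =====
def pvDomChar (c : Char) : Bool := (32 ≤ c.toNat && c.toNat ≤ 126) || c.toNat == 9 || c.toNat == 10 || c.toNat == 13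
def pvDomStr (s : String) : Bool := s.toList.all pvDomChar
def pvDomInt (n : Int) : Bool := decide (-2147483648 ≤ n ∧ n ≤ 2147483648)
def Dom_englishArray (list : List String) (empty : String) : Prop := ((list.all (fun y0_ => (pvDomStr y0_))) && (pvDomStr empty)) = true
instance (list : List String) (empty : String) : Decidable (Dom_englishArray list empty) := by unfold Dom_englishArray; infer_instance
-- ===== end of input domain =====

-- B replaces A's enumerate loop (per-index comma/'and' branches) with ', '.join(list[:-1]) + ', and ' + list[-1]; idiomatic, same cost.

-- ===== PORT A =====
def englishArray (list : List String) (empty : String) : String :=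
  if list.length = 0 then empty
  else if list.length = 1 then PySem.List.pyGetD list 0 ""
  else if list.length = 2 then
    PySem.List.pyGetD list 0 "" ++ " and " ++ PySem.List.pyGetD list 1 ""
  else
    (PySem.List.enumerate list 0).foldl
      (fun string p =>
        let string := if p.1 ≠ 0 then string ++ ", " else string
        let string := if p.1 = (list.length : Int) - 1 then string ++ "and " else string
        string ++ p.2) ""

-- ===== PORT B =====
def englishArray_alt (list : List String) (empty : String) : String :=
  if list.length = 0 then empty
  else if list.length = 1 then PySem.List.pyGetD list 0 ""
  else if list.length = 2 then
    PySem.List.pyGetD list 0 "" ++ " and " ++ PySem.List.pyGetD list 1 ""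
  else
    PySem.Str.join ", " (PySem.List.slice list none (some (-1))) ++ ", and " ++
      PySem.List.pyGetD list (-1) ""

-- ===== PRECONDITION & SPEC =====
def Spec_englishArray (list : List String) (empty : String) (out : String) : Prop := out = englishArray_alt list empty
instance (list : List String) (empty : String) (out : String) : Decidable (Spec_englishArray list empty out) := by unfold Spec_englishArray; infer_instance

-- ===== CLAIM (what is proved, stated in full; the proofs are below) =====
def Claim_equal_englishArray : Prop := ∀ (list : List String) (empty : String), Dom_englishArray list empty → Spec_englishArray list empty (englishArray list empty)

-- ===== LEMMAS AND PROOFS =====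

-- "x, y, …, and z" rendering of a nonempty tail (proof-only helper)
def joinAnd : List String → String
  | [] => ""
  | [x] => "and " ++ x
  | x :: y :: ys => x ++ ", " ++ joinAnd (y :: ys)

-- A's loop over the items at indices ≥ 1, with n the full length
theorem loopA (l : List String) (acc : String) (s n : Int)
    (hs : 1 ≤ s) (hn : s + l.length = n) (hne : l ≠ []) :
    (PySem.List.enumerate l s).foldl
      (fun string p =>
        (if p.1 = n - 1 then (if p.1 ≠ 0 then string ++ ", " else string) ++ "and "
         else if p.1 ≠ 0 then string ++ ", " else string) ++ p.2) acc
    = acc ++ ", " ++ joinAnd l := by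
  induction l generalizing acc s with
  | nil => exact absurd rfl hne
  | cons x xs ih =>
    cases xs with
    | nil =>
      have h1 : s ≠ 0 := by omega
      have h2 : s = n - 1 := by simp at hn; omega
      rw [PySem.List.enumerate_cons, PySem.List.enumerate_nil]
      simp only [List.foldl_cons, List.foldl_nil]
      rw [if_pos h2, if_pos h1]
      simp only [joinAnd]
      rw [String.append_assoc]
    | cons y ys =>
      have h1 : s ≠ 0 := by omega
      have h2 : ¬ (s = n - 1) := by simp at hn ⊢; omega
      rw [PySem.List.enumerate_cons]
      simp only [List.foldl_cons]
      rw [if_neg h2, if_pos h1]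
      rw [ih ((acc ++ ", " ++ x)) (s + 1) (by omega) (by simp at hn ⊢; omega) (by simp)]
      simp [joinAnd, String.append_assoc]

theorem join_cons (x : String) (l : List String) (hne : l ≠ []) :
    PySem.Str.join ", " (x :: l) = x ++ ", " ++ PySem.Str.join ", " l := by
  cases l with
  | nil => exact absurd rfl hne
  | cons y ys =>
    apply String.ext
    simp [PySem.Str.toList_join, PySem.Chars.join_cons_cons, String.append_assoc]

theorem joinAnd_eq (x : String) (l : List String) (hne : l ≠ []) :
    x ++ ", " ++ joinAnd l
    = PySem.Str.join ", " ((x :: l).dropLast) ++ ", and " ++ (x :: l).getLast (by simp) := by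
  induction l generalizing x with
  | nil => exact absurd rfl hne
  | cons y ys ih =>
    cases ys with
    | nil =>
      show x ++ ", " ++ ("and " ++ y) = PySem.Str.join ", " [x] ++ ", and " ++ y
      have : PySem.Str.join ", " [x] = x := by
        apply String.ext; simp [PySem.Str.toList_join, PySem.Chars.join_singleton]
      rw [this]
      apply String.ext
      simp [String.append_assoc]
    | cons z zs =>
      have hd : (y :: z :: zs).dropLast ≠ [] := by
        intro h
        have := congrArg List.length h
        simp [List.length_dropLast] at this
      show x ++ ", " ++ (y ++ ", " ++ joinAnd (z :: zs)) = _
      have hlast : (x :: y :: z :: zs).getLast (by simp) = (y :: z :: zs).getLast (by simp) := by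
        simp [List.getLast_cons]
      have hdrop : (x :: y :: z :: zs).dropLast = x :: (y :: z :: zs).dropLast := by
        simp [List.dropLast_cons_of_ne_nil]
      rw [hlast, hdrop, join_cons x _ hd, ih y (by simp)]
      simp [String.append_assoc]

-- ===== VERDICT (by name: the statement is the Claim_ definition above) =====
theorem englishArray_spec : Claim_equal_englishArray := by
  intro list empty _
  unfold Spec_englishArray englishArray englishArray_alt
  cases list with
  | nil => simp
  | cons a l =>
    cases l with
    | nil => simp
    | cons b l2 =>
      cases l2 with
      | nil => simp
      | cons c l3 =>
        have hlen : ¬ ((a :: b :: c :: l3).length = 0) ∧ ¬ ((a :: b :: c :: l3).length = 1)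
            ∧ ¬ ((a :: b :: c :: l3).length = 2) := by simp
        rw [if_neg hlen.1, if_neg hlen.2.1, if_neg hlen.2.2,
            if_neg hlen.1, if_neg hlen.2.1, if_neg hlen.2.2]
        rw [PySem.List.enumerate_cons]
        simp only [List.foldl_cons]
        have h0 : ¬ ((0 : Int) ≠ 0) := by simp
        have h1 : ¬ ((0 : Int) = ((a :: b :: c :: l3).length : Int) - 1) := by
          simp; omega
        rw [if_neg h1, if_neg h0]
        rw [loopA (b :: c :: l3) ("" ++ a) (0 + 1) ((a :: b :: c :: l3).length : Int)
          (by omega) (by simp; omega) (by simp)]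
        rw [PySem.List.slice_to_neg_one, PySem.List.pyGetD_neg_one _ _ (by simp)]
        rw [String.empty_append]
        exact joinAnd_eq a (b :: c :: l3) (by simp)
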